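-- pv_equiv track=rewrite | github.com/SRI-AIC/InterestingnessXRL | interestingness_xrl/learning/__init__.py | get_discretized_index
-- ===== SOURCE A (Python) =====
-- def get_discretized_index(obs_vec, feats_nbins):
--     """
--     Gets a number/index denoting the unique combination of the given discretized features.
--     :param array_like obs_vec: a list containing the discretized features.
--     :param array_like feats_nbins: a list with the number of bins for each feature, i.e., the maximal features values
--     that each feature can have.
--     :return int: an index denoting the unique combination of the given features.
--     """
--     idx = 0
--     for i in range(len(obs_vec)):
--         if obs_vec[i] == 0:
--             continue
--         stride = 1
--         for j in range(i + 1, len(obs_vec)):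
--             stride *= feats_nbins[j]
--         idx += obs_vec[i] * stride
--     return idx
-- ===== SOURCE B (Python) =====
-- def get_discretized_index(obs_vec, feats_nbins):
--     idx = 0
--     stride = 1
--     for i in range(len(obs_vec) - 1, -1, -1):
--         idx += obs_vec[i] * stride
--         stride *= feats_nbins[i]
--     return idx
-- ===== Notes on version B (the rewrite author's own statement) =====
-- stated objective: faster
-- what changed: B replaces A's per-index recomputation of the suffix stride (an inner loop for every nonzero feature) with a single right-to-left pass that maintains a running stride product.
-- outside the precondition, e.g. on get_discretized_index([0, 0, 5], [2, 2]): A returns 5, B raises IndexError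
import Mathlib
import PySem

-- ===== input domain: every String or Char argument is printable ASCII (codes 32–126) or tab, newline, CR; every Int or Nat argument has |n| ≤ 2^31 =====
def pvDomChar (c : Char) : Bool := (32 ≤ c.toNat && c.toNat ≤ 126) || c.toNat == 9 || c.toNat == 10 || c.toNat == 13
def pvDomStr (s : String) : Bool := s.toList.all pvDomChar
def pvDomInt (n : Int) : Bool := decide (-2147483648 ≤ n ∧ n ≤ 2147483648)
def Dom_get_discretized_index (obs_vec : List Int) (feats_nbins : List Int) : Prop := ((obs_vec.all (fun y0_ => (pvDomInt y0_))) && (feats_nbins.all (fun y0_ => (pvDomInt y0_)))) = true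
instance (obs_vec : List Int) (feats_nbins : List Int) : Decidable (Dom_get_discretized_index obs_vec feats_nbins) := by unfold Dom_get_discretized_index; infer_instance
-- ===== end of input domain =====

-- B replaces A's per-index inner loop recomputing suffix strides by one right-to-left pass
-- with a running stride product (asymptotically faster); equivalence proved for
-- len(obs_vec) <= len(feats_nbins).


-- ===== PORT A =====
-- inner loop 'stride = 1; for j in range(i + 1, len(obs_vec)): stride *= feats_nbins[j]'
def pvStride (feats_nbins : List Int) (i n : Int) : Int :=
  (PySem.List.pyRange (i + 1) n 1).foldl (fun s j => s * PySem.List.pyGetD feats_nbins j 0) 1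

def get_discretized_index (obs_vec : List Int) (feats_nbins : List Int) : Int :=
  (PySem.List.pyRange 0 (obs_vec.length : Int) 1).foldl
    (fun idx i =>
      if PySem.List.pyGetD obs_vec i 0 = 0 then idx
      else idx + PySem.List.pyGetD obs_vec i 0 * pvStride feats_nbins i (obs_vec.length : Int)) 0

-- ===== PORT B =====
def get_discretized_index_alt (obs_vec : List Int) (feats_nbins : List Int) : Int :=
  ((PySem.List.pyRange ((obs_vec.length : Int) - 1) (-1) (-1)).foldl
    (fun (p : Int × Int) i =>
      (p.1 + PySem.List.pyGetD obs_vec i 0 * p.2,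
       p.2 * PySem.List.pyGetD feats_nbins i 0)) ((0 : Int), (1 : Int))).1

-- ===== PRECONDITION & SPEC =====
-- Pre_ excludes mismatched lengths (len(obs_vec) > len(feats_nbins)): there A raises IndexError,
-- except accidentally when every entry before the last is zero (the stride loops are skipped);
-- B raises IndexError on all of them.
def Pre_get_discretized_index (obs_vec : List Int) (feats_nbins : List Int) : Prop :=
  obs_vec.length ≤ feats_nbins.length
instance (obs_vec : List Int) (feats_nbins : List Int) : Decidable (Pre_get_discretized_index obs_vec feats_nbins) := by unfold Pre_get_discretized_index; infer_instance

def pvWitness_get_discretized_index : List Int × List Int := ([1, 0, 2], [3, 4, 5])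

def Spec_get_discretized_index (obs_vec : List Int) (feats_nbins : List Int) (out : Int) : Prop := out = get_discretized_index_alt obs_vec feats_nbins
instance (obs_vec : List Int) (feats_nbins : List Int) (out : Int) : Decidable (Spec_get_discretized_index obs_vec feats_nbins out) := by unfold Spec_get_discretized_index; infer_instance

-- ===== CLAIM (what is proved, stated in full; the proofs are below) =====
def Claim_equal_get_discretized_index : Prop := ∀ (obs_vec : List Int) (feats_nbins : List Int), Dom_get_discretized_index obs_vec feats_nbins → Pre_get_discretized_index obs_vec feats_nbins → Spec_get_discretized_index obs_vec feats_nbins (get_discretized_index obs_vec feats_nbins)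

-- ===== LEMMAS AND PROOFS =====

-- Mixed-radix value of the first m features (Horner form); both ports are proved equal to it at m = length.
def pvRef (obs feats : List Int) (m : Nat) : Int :=
  ((obs.take m).zip (feats.take m)).foldl (fun a p => a * p.2 + p.1) 0

lemma pvRef_succ (obs feats : List Int) (m : Nat) (h1 : m < obs.length) (h2 : m < feats.length) :
    pvRef obs feats (m + 1) = pvRef obs feats m * feats.getD m 0 + obs.getD m 0 := by
  unfold pvRef
  rw [List.take_add_one, List.take_add_one, obs.getElem?_eq_getElem h1, feats.getElem?_eq_getElem h2,
      List.zip_append (by simp [Nat.le_of_lt, h1, h2]), List.foldl_append,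
      List.getD_eq_getElem obs 0 h1, List.getD_eq_getElem feats 0 h2]
  simp

lemma pvStride_factor (feats : List Int) (l : List Int) (c : Int) :
    l.foldl (fun s j => s * PySem.List.pyGetD feats j 0) c
      = c * l.foldl (fun s j => s * PySem.List.pyGetD feats j 0) 1 := by
  induction l generalizing c with
  | nil => simp
  | cons x t ih =>
    simp only [List.foldl_cons]
    rw [ih, ih (1 * PySem.List.pyGetD feats x 0)]
    ring

lemma pvStride_self (feats : List Int) (n : Int) : pvStride feats (n - 1) n = 1 := by
  unfold pvStride
  rw [show n - 1 + 1 = n by ring, PySem.List.pyRange_one_eq_nil le_rfl]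
  rfl

lemma pvStride_step (feats : List Int) (m : Nat) (n : Int) (h : (m : Int) < n) :
    pvStride feats ((m : Int) - 1) n = feats.getD m 0 * pvStride feats (m : Int) n := by
  unfold pvStride
  rw [show (m : Int) - 1 + 1 = (m : Int) by ring, PySem.List.pyRange_one_cons h]
  simp only [List.foldl_cons, one_mul]
  rw [pvStride_factor, PySem.List.pyGetD_natCast]

lemma pvAloop (obs feats : List Int) (hf : obs.length ≤ feats.length) (m : Nat)
    (hm : m ≤ obs.length) :
    (PySem.List.pyRange 0 (m : Int) 1).foldl
      (fun idx i =>
        if PySem.List.pyGetD obs i 0 = 0 then idx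
        else idx + PySem.List.pyGetD obs i 0 * pvStride feats i (obs.length : Int)) 0
      = pvRef obs feats m * pvStride feats ((m : Int) - 1) (obs.length : Int) := by
  induction m with
  | zero => simp [PySem.List.pyRange_one_eq_nil, pvRef]
  | succ k ih =>
    have hk : k < obs.length := by omega
    have hk2 : k < feats.length := by omega
    rw [show ((k + 1 : Nat) : Int) = (k : Int) + 1 by push_cast; ring,
        PySem.List.pyRange_one_succ_right (by positivity), List.foldl_append,
        ih (by omega)]
    have hstep := pvStride_step feats k (obs.length : Int) (by exact_mod_cast hk)
    rw [show (k : Int) + 1 - 1 = (k : Int) by ring]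
    simp only [List.foldl_cons, List.foldl_nil, PySem.List.pyGetD_natCast]
    rw [pvRef_succ obs feats k hk hk2, hstep]
    split_ifs with hz
    · rw [hz]; ring
    · ring

def pvProd (feats : List Int) (m : Nat) : Int := (feats.take m).prod

lemma pvProd_succ (feats : List Int) (m : Nat) (h : m < feats.length) :
    pvProd feats (m + 1) = pvProd feats m * feats.getD m 0 := by
  unfold pvProd
  rw [List.prod_take_succ feats m h, List.getD_eq_getElem feats 0 h]

lemma pvBloop (obs feats : List Int) (hf : obs.length ≤ feats.length) (m : Nat)
    (hm : m ≤ obs.length) (a s : Int) :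
    (PySem.List.pyRange ((m : Int) - 1) (-1) (-1)).foldl
      (fun (p : Int × Int) i =>
        (p.1 + PySem.List.pyGetD obs i 0 * p.2,
         p.2 * PySem.List.pyGetD feats i 0)) (a, s)
      = (a + s * pvRef obs feats m, s * pvProd feats m) := by
  induction m generalizing a s with
  | zero => simp [PySem.List.pyRange_neg_one_eq_nil, pvRef, pvProd]
  | succ k ih =>
    have hk : k < obs.length := by omega
    have hk2 : k < feats.length := by omega
    rw [show ((k + 1 : Nat) : Int) - 1 = (k : Int) by push_cast; ring,
        PySem.List.pyRange_neg_one_cons (by omega)]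
    simp only [List.foldl_cons, PySem.List.pyGetD_natCast]
    rw [ih (by omega), pvRef_succ obs feats k hk hk2, pvProd_succ feats k hk2]
    simp only [Prod.mk.injEq]
    constructor <;> ring

lemma pvA_eq_ref (obs feats : List Int) (hf : obs.length ≤ feats.length) :
    get_discretized_index obs feats = pvRef obs feats obs.length := by
  unfold get_discretized_index
  rw [pvAloop obs feats hf obs.length le_rfl, pvStride_self]
  ring

lemma pvB_eq_ref (obs feats : List Int) (hf : obs.length ≤ feats.length) :
    get_discretized_index_alt obs feats = pvRef obs feats obs.length := by
  unfold get_discretized_index_alt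
  rw [pvBloop obs feats hf obs.length le_rfl 0 1]
  simp

-- ===== VERDICT (by name: the statement is the Claim_ definition above) =====
theorem get_discretized_index_spec : Claim_equal_get_discretized_index := by
  intro obs feats _ hpre
  unfold Spec_get_discretized_index
  rw [pvA_eq_ref obs feats hpre, pvB_eq_ref obs feats hpre]
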